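-- pv_equiv track=rewrite | github.com/WilliamGustafson/cdIndexCalculator | uncrossing.py | setFormat
-- ===== SOURCE A (Python) =====
-- def setFormat(x):
-- 	ret = []
-- 	i = 1
-- 	while x!= 0:
-- 		if x&1: ret.append(str(i))
-- 		x >>= 1
-- 		i += 1
-- 	return "{"+",".join(ret)+"}"
-- ===== SOURCE B (Python) =====
-- def setFormat(x):
-- 	bits = format(x, 'b')[::-1]
-- 	return "{" + ",".join(str(i + 1) for i, c in enumerate(bits) if c == '1') + "}"
-- ===== Notes on version B (the rewrite author's own statement) =====
-- stated objective: idiomatic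
-- what changed: B scans the characters of the binary string representation (format(x,'b') reversed, enumerate + comprehension) instead of A's while-loop that shifts the integer and maintains a position counter.
import Mathlib
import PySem

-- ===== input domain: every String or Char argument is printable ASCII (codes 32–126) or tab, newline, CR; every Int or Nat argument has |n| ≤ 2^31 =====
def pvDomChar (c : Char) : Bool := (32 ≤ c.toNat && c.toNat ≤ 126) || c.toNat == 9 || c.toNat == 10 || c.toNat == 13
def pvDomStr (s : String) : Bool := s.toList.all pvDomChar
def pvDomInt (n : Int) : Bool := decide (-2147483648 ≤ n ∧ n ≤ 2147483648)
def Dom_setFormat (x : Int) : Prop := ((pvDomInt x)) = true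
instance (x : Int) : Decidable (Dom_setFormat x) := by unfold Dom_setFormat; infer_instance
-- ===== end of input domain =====

-- B formats the set from the binary string representation instead of A's shift-and-count loop (idiomatic rewrite, same cost).

-- ===== PORT A =====
-- while x != 0: if x&1: ret.append(str(i)); x >>= 1; i += 1
-- (for x < 0 Python's loop never terminates; the x < 0 guard below only makes the
--  Lean function total — those inputs are excluded by Pre_setFormat)
def setFormatLoop (x : Int) (i : Int) (ret : List String) : List String :=
  if x = 0 then ret
  else if _h : x < 0 then ret
  else
    setFormatLoop (PySem.Int.floordiv x 2) (i + 1)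
      (if PySem.Int.mod x 2 ≠ 0 then ret ++ [PySem.Int.toStr i] else ret)
termination_by x.toNat
decreasing_by
  rw [PySem.Int.floordiv_eq_ediv_of_pos (by norm_num)]
  omega

def setFormat (x : Int) : String :=
  "{" ++ PySem.Str.join "," (setFormatLoop x 1 []) ++ "}"

-- ===== PORT B =====
-- bits = format(x, 'b')[::-1]; "{" + ",".join(str(i+1) for i, c in enumerate(bits) if c == '1') + "}"
def setFormat_alt (x : Int) : String :=
  "{" ++
    PySem.Str.join ","
      (((PySem.List.enumerate ((PySem.Int.toBinChars x).reverse)).filter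
          (fun p => p.2 == '1')).map
        (fun p => PySem.Int.toStr (p.1 + 1))) ++
  "}"

-- ===== PRECONDITION & SPEC =====
-- Pre_ excludes x < 0: there A's loop never terminates (x >>= 1 stays at -1), so A returns on exactly x ≥ 0.
def Pre_setFormat (x : Int) : Prop := 0 ≤ x
instance (x : Int) : Decidable (Pre_setFormat x) := by unfold Pre_setFormat; infer_instance
def pvWitness_setFormat : Int := (5)

def Spec_setFormat (x : Int) (out : String) : Prop := out = setFormat_alt x
instance (x : Int) (out : String) : Decidable (Spec_setFormat x out) := by unfold Spec_setFormat; infer_instance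

-- ===== CLAIM (what is proved, stated in full; the proofs are below) =====
def Claim_equal_setFormat : Prop := ∀ (x : Int), Dom_setFormat x → Pre_setFormat x → Spec_setFormat x (setFormat x)

-- ===== LEMMAS AND PROOFS =====

-- LSB-first binary digits of n (always at least one digit; lsb 0 = ['0']).
def lsb (n : Nat) : List Char :=
  Nat.digitChar (n % 2) :: (if _h : n / 2 = 0 then [] else lsb (n / 2))
termination_by n
decreasing_by omega

-- the selection both programs perform: keep positions (1-based, counting from i) of '1' digits
def sel (i : Int) : List Char → List String
  | [] => []
  | c :: cs => (if c = '1' then [PySem.Int.toStr i] else []) ++ sel (i + 1) cs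

theorem sel_lsb_zero (i : Int) : sel i (lsb 0) = [] := by
  rw [lsb]
  simp [sel, Nat.digitChar]

theorem sel_lsb (n : Nat) (h0 : n ≠ 0) (i : Int) :
    sel i (lsb n) = (if n % 2 = 1 then [PySem.Int.toStr i] else []) ++ sel (i + 1) (lsb (n / 2)) := by
  rw [lsb]
  by_cases hd : n / 2 = 0
  · rw [hd, sel_lsb_zero]
    rcases Nat.mod_two_eq_zero_or_one n with hm | hm <;>
      simp [sel, hm, Nat.digitChar]
  · rcases Nat.mod_two_eq_zero_or_one n with hm | hm <;>
      simp [sel, hm, hd, Nat.digitChar]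

theorem loop_eq_sel : ∀ (n : Nat) (i : Int) (ret : List String),
    setFormatLoop (n : Int) i ret = ret ++ sel i (lsb n) := by
  intro n
  induction n using Nat.strong_induction_on with
  | _ n ih =>
    intro i ret
    by_cases h0 : n = 0
    · subst h0; rw [setFormatLoop, sel_lsb_zero]; simp
    · have hne : (n : Int) ≠ 0 := by exact_mod_cast h0
      have hnn : ¬ ((n : Int) < 0) := by omega
      have hdiv : PySem.Int.floordiv (n : Int) 2 = ((n / 2 : Nat) : Int) := by
        exact_mod_cast PySem.Int.floordiv_natCast n 2
      have hmod : PySem.Int.mod (n : Int) 2 = ((n % 2 : Nat) : Int) := by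
        exact_mod_cast PySem.Int.mod_natCast n 2
      rw [setFormatLoop, if_neg hne, dif_neg hnn, hdiv, ih (n / 2) (by omega),
        hmod, sel_lsb n h0 i]
      rcases Nat.mod_two_eq_zero_or_one n with hm | hm <;> simp [hm]

-- enumerate/filter/map over a char list is exactly the selection sel
theorem enum_eq_sel : ∀ (cs : List Char) (s : Int),
    ((PySem.List.enumerate cs s).filter (fun p => p.2 == '1')).map
      (fun p => PySem.Int.toStr (p.1 + 1)) = sel (s + 1) cs := by
  intro cs
  induction cs with
  | nil => intro s; simp [PySem.List.enumerate_nil, sel]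
  | cons c cs ih =>
    intro s
    rw [PySem.List.enumerate_cons]
    by_cases hc : c = '1' <;> simp [sel, List.filter_cons, hc, ih]

-- Nat.toDigitsCore with enough fuel produces the MSB-first digits: (lsb n).reverse ++ ds
theorem toDigitsCore_eq : ∀ (fuel n : Nat) (ds : List Char), n < 2 ^ fuel → 1 ≤ fuel →
    Nat.toDigitsCore 2 fuel n ds = (lsb n).reverse ++ ds := by
  intro fuel
  induction fuel with
  | zero => intro n ds _ h1; exact absurd h1 (by omega)
  | succ fuel ih =>
    intro n ds h _
    rw [Nat.toDigitsCore]
    by_cases hd : n / 2 = 0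
    · simp only [hd, if_pos]
      conv_rhs => rw [lsb]
      simp [hd]
    · have h2 : (2 : Nat) ^ (fuel + 1) = 2 * 2 ^ fuel := by rw [pow_succ]; ring
      rcases Nat.eq_zero_or_pos fuel with hf | hf
      · subst hf; norm_num at h; omega
      · rw [if_neg hd, ih (n / 2) _ (by omega) hf]
        conv_rhs => rw [lsb]
        rw [dif_neg hd, List.reverse_cons, List.append_assoc]
        rfl

theorem toDigits_eq_lsb (n : Nat) : Nat.toDigits 2 n = (lsb n).reverse := by
  have h1 : n < 2 ^ n := Nat.lt_two_pow_self
  have h2 : (2 : Nat) ^ n ≤ 2 ^ (n + 1) := Nat.pow_le_pow_right (by norm_num) (by omega)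
  have := toDigitsCore_eq (n + 1) n [] (by omega) (by omega)
  rw [Nat.toDigits]
  simpa using this

theorem toBinChars_reverse (x : Int) (hx : 0 ≤ x) :
    (PySem.Int.toBinChars x).reverse = lsb x.toNat := by
  unfold PySem.Int.toBinChars
  rw [if_neg (by omega), toDigits_eq_lsb, List.reverse_reverse]

-- ===== VERDICT (by name: the statement is the Claim_ definition above) =====
theorem setFormat_spec : Claim_equal_setFormat := by
  intro x _ hpre
  have hx0 : 0 ≤ x := hpre
  unfold Spec_setFormat setFormat setFormat_alt
  rw [toBinChars_reverse x hx0, enum_eq_sel (lsb x.toNat) 0]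
  have hx : x = ((x.toNat : Nat) : Int) := by omega
  conv_lhs => rw [hx]
  rw [loop_eq_sel x.toNat 1 []]
  norm_num
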